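-- pv_equiv track=rewrite | github.com/xjuuwme/star | lc/reshape_mat.py | matrixReshape2
-- ===== SOURCE A (Python) =====
-- def matrixReshape2(mat, r: int, c: int):
--     """my solution"""
--     if len(mat) * len(mat[0]) != r*c:
--         return mat
--     res = []
--     newrow = []
--     i = 0
--     for row in mat:
--         for item in row:
--             newrow.append(item)
--             if (i+1) % c == 0:
--                 res.append(newrow)
--                 newrow = []
--             i += 1
--     return res
-- ===== SOURCE B (Python) =====
-- def matrixReshape2(mat, r: int, c: int):
--     """Two-pass rebuild: flatten once, then take the len//c full slices of size c."""
--     if len(mat) * len(mat[0]) != r * c: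
--         return mat
--     flat = [v for row in mat for v in row]
--     return [flat[i * c:(i + 1) * c] for i in range(len(flat) // c)]
-- ===== Notes on version B (the rewrite author's own statement) =====
-- stated objective: alternative
-- what changed: B flattens the matrix once and then takes the len(flat)//c full slices of size c by index slicing, replacing A's single streaming pass that grows a row element by element and closes it on a modulo counter.
-- outside the precondition, e.g. on matrixReshape2([[]], 5, 0): A returns [], B raises ZeroDivisionError; on matrixReshape2([[1, 2]], -1, -2): A returns [[1, 2]], B returns []; on matrixReshape2([[1]], -1, -1): A returns [[1]], B returns []
import Mathlib
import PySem

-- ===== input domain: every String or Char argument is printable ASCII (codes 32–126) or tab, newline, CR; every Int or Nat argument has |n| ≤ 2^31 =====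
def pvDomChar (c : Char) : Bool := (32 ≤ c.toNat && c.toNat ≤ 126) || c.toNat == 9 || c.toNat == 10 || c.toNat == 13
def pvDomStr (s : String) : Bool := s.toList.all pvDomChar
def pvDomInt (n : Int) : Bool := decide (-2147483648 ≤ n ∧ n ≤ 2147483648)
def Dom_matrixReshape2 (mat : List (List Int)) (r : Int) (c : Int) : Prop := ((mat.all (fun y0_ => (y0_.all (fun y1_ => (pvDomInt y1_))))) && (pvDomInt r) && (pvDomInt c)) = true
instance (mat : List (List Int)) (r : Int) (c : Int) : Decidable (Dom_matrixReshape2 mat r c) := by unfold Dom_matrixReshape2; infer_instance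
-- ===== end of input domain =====

-- B rebuilds the reshape in two passes (flatten once, then take the len//c full slices of size c)
-- instead of A's single streaming pass that grows a row and closes it on a modulo counter.
-- Objective: alternative decomposition, no speed claim.

-- ===== PORT A =====
-- step of A's inner loop: state = (res, newrow, i)
def pvStepA (c : Int) (st : List (List Int) × List Int × Int) (item : Int) :
    List (List Int) × List Int × Int :=
  let newrow := st.2.1 ++ [item]
  if PySem.Int.mod (st.2.2 + 1) c = 0 then (st.1 ++ [newrow], [], st.2.2 + 1)
  else (st.1, newrow, st.2.2 + 1)

def matrixReshape2 (mat : List (List Int)) (r : Int) (c : Int) : List (List Int) :=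
  match mat with
  | [] => []  -- Python: len(mat[0]) raises IndexError here; excluded by Pre_
  | row0 :: _ =>
    if (mat.length : Int) * (row0.length : Int) ≠ r * c then mat
    else
      (mat.foldl (fun st row => row.foldl (pvStepA c) st) ([], [], 0)).1

-- ===== PORT B =====
def matrixReshape2_alt (mat : List (List Int)) (r : Int) (c : Int) : List (List Int) :=
  match mat with
  | [] => []  -- Python: len(mat[0]) raises IndexError here; excluded by Pre_
  | row0 :: _ =>
    if (mat.length : Int) * (row0.length : Int) ≠ r * c then mat
    else
      let flat := mat.flatMap (fun row => row)
      (PySem.List.pyRange 0 (PySem.Int.floordiv (flat.length : Int) c) 1).map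
        (fun i => PySem.List.slice flat (some (i * c)) (some ((i + 1) * c)))

-- ===== PRECONDITION & SPEC =====
-- Pre_ excludes mat = [] (IndexError on mat[0] in both Pythons) and the unspecified corner of a
-- nonpositive chunk size c that passes A's size guard: for c = 0 both Pythons raise
-- ZeroDivisionError when any element exists (A happens to return [] on all-empty rows, where B
-- still raises), and for c < 0 A accidentally groups the elements into |c|-sized chunks (Python's
-- negative modulo fires) while B asks for len//c < 0 slices and returns [] — a corner nobody
-- would specify, on which both answers are defensible.
def Pre_matrixReshape2 (mat : List (List Int)) (r : Int) (c : Int) : Prop :=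
  mat ≠ [] ∧ ¬(c ≤ 0 ∧ (mat.length : Int) * ((mat.headI).length : Int) = r * c)
instance (mat : List (List Int)) (r : Int) (c : Int) : Decidable (Pre_matrixReshape2 mat r c) := by unfold Pre_matrixReshape2; infer_instance
def pvWitness_matrixReshape2 : List (List Int) × Int × Int := ([[1, 2], [3, 4]], 2, 2)

def Spec_matrixReshape2 (mat : List (List Int)) (r : Int) (c : Int) (out : List (List Int)) : Prop := out = matrixReshape2_alt mat r c
instance (mat : List (List Int)) (r : Int) (c : Int) (out : List (List Int)) : Decidable (Spec_matrixReshape2 mat r c out) := by unfold Spec_matrixReshape2; infer_instance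
-- ===== CLAIM (what is proved, stated in full; the proofs are below) =====
def Claim_equal_matrixReshape2 : Prop := ∀ (mat : List (List Int)) (r : Int) (c : Int), Dom_matrixReshape2 mat r c → Pre_matrixReshape2 mat r c → Spec_matrixReshape2 mat r c (matrixReshape2 mat r c)

-- ===== LEMMAS AND PROOFS =====

-- reference chunking: the consecutive FULL chunks of size c, remainder dropped
def pvChunksF (c : Nat) (l : List Int) : List (List Int) :=
  if c = 0 ∨ l.length < c then [] else l.take c :: pvChunksF c (l.drop c)
termination_by l.length
decreasing_by
  rename_i h
  rw [not_or] at h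
  simp only [List.length_drop]
  omega

theorem pvChunksF_short (c : Nat) (l : List Int) (h : l.length < c) : pvChunksF c l = [] := by
  unfold pvChunksF
  simp [h]

theorem pvChunksF_step (c : Nat) (l : List Int) (hc : c ≠ 0) (h : c ≤ l.length) :
    pvChunksF c l = l.take c :: pvChunksF c (l.drop c) := by
  conv_lhs => unfold pvChunksF
  simp [hc, not_lt.mpr h]

-- A's nested foldl over the rows is the foldl over the flattened list
theorem foldl_rows (f : (List (List Int) × List Int × Int) → Int → (List (List Int) × List Int × Int))
    (L : List (List Int)) (init : List (List Int) × List Int × Int) :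
    L.foldl (fun st row => row.foldl f st) init = L.flatten.foldl f init := by
  induction L generalizing init with
  | nil => rfl
  | cons row L ih => simp [List.foldl_append, ih]

-- a run of A's step that never hits a chunk boundary only extends newrow
theorem runA_no_close (c : Int) (xs : List Int) (res : List (List Int)) (acc : List Int) (i : Int)
    (h : ∀ j : Nat, j < xs.length → ¬ (c ∣ (i + j + 1))) :
    xs.foldl (pvStepA c) (res, acc, i) = (res, acc ++ xs, i + xs.length) := by
  induction xs generalizing acc i with
  | nil => simp
  | cons x xs ih =>
    have h0 : ¬ (c ∣ (i + 1)) := by simpa using h 0 (by simp)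
    have hstep : pvStepA c (res, acc, i) x = (res, acc ++ [x], i + 1) := by
      simp [pvStepA, PySem.Int.mod_eq_zero_iff_dvd, h0]
    have h' : ∀ j : Nat, j < xs.length → ¬ (c ∣ (i + 1 + j + 1)) := by
      intro j hj
      have h2 := h (j + 1) (by simpa using Nat.succ_lt_succ hj)
      push_cast at h2
      have e : i + 1 + (j : Int) + 1 = i + ((j : Int) + 1) + 1 := by ring
      rw [e]; exact h2
    rw [List.foldl_cons, hstep, ih (acc ++ [x]) (i + 1) h']
    simp
    ring

-- for 0 < c, no boundary is hit within fewer than c steps after a boundary state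
theorem no_close_short (c : Int) (_hc : 0 < c) (i : Int) (hi : c ∣ i) (xs : List Int)
    (hlen : (xs.length : Int) < c) :
    ∀ j : Nat, j < xs.length → ¬ (c ∣ (i + j + 1)) := by
  intro j hj hdvd
  have hj1 : c ∣ ((j : Int) + 1) := by
    have hsub := dvd_sub hdvd hi
    rw [show i + (j : Int) + 1 - i = (j : Int) + 1 from by ring] at hsub
    exact hsub
  have hle := Int.le_of_dvd (by omega) hj1
  omega

-- consuming one full chunk of c elements from a boundary state closes exactly one row
theorem runA_block (c : Int) (hc : 0 < c) (xs : List Int) (hx : c.toNat ≤ xs.length)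
    (res : List (List Int)) (i : Int) (hi : c ∣ i) :
    xs.foldl (pvStepA c) (res, [], i) =
      (xs.drop c.toNat).foldl (pvStepA c) (res ++ [xs.take c.toNat], [], i + c) := by
  have hlen : (xs.take c.toNat).length = c.toNat := by
    simp [List.length_take]; omega
  have hne : xs.take c.toNat ≠ [] := by
    intro hemp; rw [hemp] at hlen; simp at hlen; omega
  rcases List.eq_nil_or_concat (xs.take c.toNat) with hcon | ⟨ys, z, hyz⟩
  · exact absurd hcon hne
  · rw [List.concat_eq_append] at hyz
    have hys_len : ys.length = c.toNat - 1 := by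
      have := hlen; rw [hyz] at this; simp at this; omega
    have hys : ∀ j : Nat, j < ys.length → ¬ (c ∣ (i + j + 1)) :=
      no_close_short c hc i hi ys (by omega)
    have hclose : c ∣ (i + (ys.length : Int) + 1) := by
      have e : i + (ys.length : Int) + 1 = i + c := by rw [hys_len]; omega
      rw [e]; exact dvd_add hi dvd_rfl
    conv_lhs => rw [(List.take_append_drop c.toNat xs).symm]
    rw [List.foldl_append, hyz, List.foldl_append, runA_no_close c ys res [] i hys]
    simp only [List.nil_append, List.foldl_cons]
    have hstep : pvStepA c (res, ys, i + (ys.length : Int)) z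
        = (res ++ [ys ++ [z]], [], i + (ys.length : Int) + 1) := by
      simp [pvStepA, PySem.Int.mod_eq_zero_iff_dvd, hclose]
    have hstate : ((res ++ [ys ++ [z]], ([] : List Int), i + (ys.length : Int) + 1)
        : List (List Int) × List Int × Int)
        = (res ++ [xs.take c.toNat], [], i + c) := by
      rw [← hyz]
      have he : i + (ys.length : Int) + 1 = i + c := by
        rw [hys_len]; omega
      rw [he]
    rw [hstep, List.foldl_nil, hstate, hyz]

-- A's result on a flat list: the full chunks of size c, the unfinished row dropped
theorem runA_chunksF (c : Int) (hc : 0 < c) : ∀ (n : Nat) (xs : List Int), xs.length = n →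
    ∀ (res : List (List Int)) (i : Int), c ∣ i →
    (xs.foldl (pvStepA c) (res, [], i)).1 = res ++ pvChunksF c.toNat xs := by
  intro n
  induction n using Nat.strong_induction_on with
  | _ n ih =>
    intro xs hn res i hi
    by_cases hlen : xs.length < c.toNat
    · rw [runA_no_close c xs res [] i (no_close_short c hc i hi xs (by omega))]
      rw [pvChunksF_short c.toNat xs hlen]
      simp
    · have hxle : c.toNat ≤ xs.length := le_of_not_gt hlen
      rw [runA_block c hc xs hxle res i hi]
      have hlt : (xs.drop c.toNat).length < n := by
        simp only [List.length_drop]; omega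
      rw [ih _ hlt (xs.drop c.toNat) rfl (res ++ [xs.take c.toNat]) (i + c)
        (dvd_add hi dvd_rfl)]
      rw [pvChunksF_step c.toNat xs (by omega) hxle]
      simp

-- B's slice map is the same full chunking
theorem runB_chunksF (c : Int) (hc : 0 < c) : ∀ (n : Nat) (flat : List Int), flat.length = n →
    (PySem.List.pyRange 0 (PySem.Int.floordiv (flat.length : Int) c) 1).map
      (fun i => PySem.List.slice flat (some (i * c)) (some ((i + 1) * c)))
      = pvChunksF c.toNat flat := by
  intro n
  induction n using Nat.strong_induction_on with
  | _ n ih =>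
    intro flat hn
    by_cases hlen : flat.length < c.toNat
    · have h0 : PySem.Int.floordiv (flat.length : Int) c = 0 := by
        rw [PySem.Int.floordiv_eq_ediv_of_pos hc]
        exact Int.ediv_eq_zero_of_lt (by positivity) (by omega)
      rw [h0, PySem.List.pyRange_one_eq_nil le_rfl, pvChunksF_short c.toNat flat hlen]
      rfl
    · have hcl : c.toNat ≤ flat.length := le_of_not_gt hlen
      have hdlen : ((flat.drop c.toNat).length : Int) = (flat.length : Int) - c := by
        simp only [List.length_drop]; push_cast [hcl]; omega
      have hq : PySem.Int.floordiv ((flat.length : Int)) c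
          = PySem.Int.floordiv (((flat.drop c.toNat).length : Int)) c + 1 := by
        rw [PySem.Int.floordiv_eq_ediv_of_pos hc, PySem.Int.floordiv_eq_ediv_of_pos hc, hdlen]
        rw [show (flat.length : Int) = ((flat.length : Int) - c) + 1 * c from by ring]
        rw [Int.add_mul_ediv_right _ _ hc.ne']
        ring_nf
      have hq0 : 0 ≤ PySem.Int.floordiv (((flat.drop c.toNat).length : Int)) c := by
        rw [PySem.Int.floordiv_eq_ediv_of_pos hc]
        exact Int.ediv_nonneg (by positivity) hc.le
      have hshift : PySem.List.pyRange 1 (PySem.Int.floordiv ((flat.length : Int)) c) 1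
          = (PySem.List.pyRange 0 (PySem.Int.floordiv ((flat.length : Int)) c - 1) 1).map
              (fun k => k + 1) := by
        rw [PySem.List.pyRange_one, PySem.List.pyRange_one, List.map_map]
        rw [show PySem.Int.floordiv ((flat.length : Int)) c - 1 - 0
            = PySem.Int.floordiv ((flat.length : Int)) c - 1 from by ring]
        refine List.map_congr_left fun k _ => ?_
        simp only [Function.comp]
        ring
      rw [PySem.List.pyRange_one_cons
          (by omega : (0 : Int) < PySem.Int.floordiv ((flat.length : Int)) c),
        show ((0 : Int) + 1) = 1 from by norm_num, List.map_cons, hshift, List.map_map]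
      have hm1 : PySem.Int.floordiv ((flat.length : Int)) c - 1
          = PySem.Int.floordiv (((flat.drop c.toNat).length : Int)) c := by omega
      have hhead : PySem.List.slice flat (some (0 * c)) (some ((0 + 1) * c))
          = flat.take c.toNat := by
        rw [zero_mul, zero_add, one_mul, PySem.List.slice_toNat flat le_rfl hc.le]
        simp
      have hmapeq : ((PySem.List.pyRange 0 (PySem.Int.floordiv (((flat.drop c.toNat).length : Int)) c) 1).map
            ((fun i => PySem.List.slice flat (some (i * c)) (some ((i + 1) * c))) ∘ (fun k => k + 1)))
          = (PySem.List.pyRange 0 (PySem.Int.floordiv (((flat.drop c.toNat).length : Int)) c) 1).map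
            (fun i => PySem.List.slice (flat.drop c.toNat) (some (i * c)) (some ((i + 1) * c))) := by
        refine List.map_congr_left fun k hk => ?_
        have hk0 : 0 ≤ k := ((PySem.List.mem_pyRange_one).mp hk).1
        have ha : 0 ≤ k * c := mul_nonneg hk0 hc.le
        simp only [Function.comp]
        rw [show (k + 1) * c = k * c + c from by ring,
          show (k + 1 + 1) * c = k * c + c + c from by ring]
        have e2 : (k * c + c + c).toNat - (k * c + c).toNat = c.toNat := by omega
        have e3 : (k * c + c).toNat - (k * c).toNat = c.toNat := by omega
        rw [PySem.List.slice_toNat _ (by omega) (by omega),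
          PySem.List.slice_toNat _ (by omega) (by omega), e2, e3, List.drop_drop]
        congr 2
        omega
      have hlt : (flat.drop c.toNat).length < n := by
        simp only [List.length_drop]; omega
      rw [hm1, hmapeq, hhead, ih _ hlt (flat.drop c.toNat) rfl,
        pvChunksF_step c.toNat flat (by omega) hcl]

-- ===== VERDICT (by name: the statement is the Claim_ definition above) =====
theorem matrixReshape2_spec : Claim_equal_matrixReshape2 := by
  intro mat r c _hdom hpre
  unfold Spec_matrixReshape2
  obtain ⟨hne, hpre2⟩ := hpre
  cases mat with
  | nil => exact absurd rfl hne
  | cons row0 rest =>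
    by_cases hg : (((row0 :: rest).length : Int) * (row0.length : Int) ≠ r * c)
    · simp only [matrixReshape2, matrixReshape2_alt, if_pos hg]
    · rw [not_not] at hg
      have hcpos : 0 < c := by
        by_contra hle
        exact hpre2 ⟨by omega, by simpa using hg⟩
      have hflat : (row0 :: rest).flatMap (fun row => row) = (row0 :: rest).flatten := by
        simp
      simp only [matrixReshape2, matrixReshape2_alt, if_neg (not_not_intro hg)]
      rw [foldl_rows, hflat, runA_chunksF c hcpos _ _ rfl [] 0 (dvd_zero c),
        runB_chunksF c hcpos _ _ rfl]
      simp
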